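-- pv_equiv track=rewrite | github.com/tristanmanchester/agent-skills | audit-openclaw-security/scripts/render_report.py | normalise_sev
-- ===== SOURCE A (Python) =====
-- SEV_ORDER = {"critical": 0, "high": 1, "medium": 2, "low": 3, "info": 4, "unknown": 9}
--
-- def normalise_sev(raw: str) -> str:
--     s = (raw or "").strip().lower()
--     if not s:
--         return "unknown"
--
--     # Some outputs may have combined severities like "warn/critical".
--     if "/" in s:
--         parts = [p.strip() for p in s.split("/") if p.strip()]
--         if "critical" in parts:
--             return "critical"
--         if "high" in parts:
--             return "high"
--         if "warn" in parts or "warning" in parts or "medium" in parts: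
--             return "medium"
--         if "low" in parts:
--             return "low"
--         if "info" in parts:
--             return "info"
--         return parts[0] if parts else "unknown"
--
--     if s in ("warn", "warning"):
--         return "medium"
--     if s == "crit":
--         return "critical"
--     if s not in SEV_ORDER:
--         # Preserve unknown labels but bucket them at end.
--         return s
--     return s
-- ===== SOURCE B (Python) =====
-- _RANK = {"critical": 0, "high": 1, "warn": 2, "warning": 2, "medium": 2, "low": 3, "info": 4}
-- _CANON = ["critical", "high", "medium", "low", "info"]
--
--
-- def normalise_sev(raw: str) -> str:
--     s = (raw or "").strip().lower()
--     if not s: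
--         return "unknown"
--     if "/" not in s:
--         if s in ("warn", "warning"):
--             return "medium"
--         return "critical" if s == "crit" else s
--     parts = [q for q in (p.strip() for p in s.split("/")) if q]
--     ranks = [_RANK[p] for p in parts if p in _RANK]
--     if ranks:
--         return _CANON[min(ranks)]
--     return parts[0] if parts else "unknown"
-- ===== Notes on version B (the rewrite author's own statement) =====
-- stated objective: alternative
-- what changed: The slash-branch priority cascade of five membership tests over the parts list is replaced by a rank-map reduction: each part is mapped through a rank dict (critical=0, high=1, warn/warning/medium=2, low=3, info=4), the minimum rank is taken, and its canonical label returned, falling back to parts[0] when no part is recognised.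
import Mathlib
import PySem

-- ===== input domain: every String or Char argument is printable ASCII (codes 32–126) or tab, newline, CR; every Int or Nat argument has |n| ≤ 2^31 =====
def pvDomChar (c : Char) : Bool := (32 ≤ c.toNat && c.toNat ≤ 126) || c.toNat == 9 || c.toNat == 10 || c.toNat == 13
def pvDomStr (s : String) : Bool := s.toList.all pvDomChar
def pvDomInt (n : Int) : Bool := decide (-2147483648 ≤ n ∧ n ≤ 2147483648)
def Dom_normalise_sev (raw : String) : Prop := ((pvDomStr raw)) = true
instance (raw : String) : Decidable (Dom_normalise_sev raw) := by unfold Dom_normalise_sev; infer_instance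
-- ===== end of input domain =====

-- B replaces A's slash-branch priority cascade of membership tests by a rank-map reduction
-- (map each part to its rank, take the minimum of the ranks, return that rank's canonical
-- label); objective: alternative.

-- ===== PORT A =====
def pvSevOrder : PySem.Dict String Int :=
  PySem.Dict.ofList [("critical", 0), ("high", 1), ("medium", 2), ("low", 3), ("info", 4), ("unknown", 9)]

def normalise_sev (raw : String) : String :=
  let s := PySem.Str.lower (PySem.Str.strip raw)
  if s = "" then "unknown"
  else if PySem.Str.isIn "/" s then
    let parts := (((PySem.Str.split? s "/").getD []).filter
        (fun p => PySem.Str.strip p != "")).map PySem.Str.strip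
    if "critical" ∈ parts then "critical"
    else if "high" ∈ parts then "high"
    else if "warn" ∈ parts ∨ "warning" ∈ parts ∨ "medium" ∈ parts then "medium"
    else if "low" ∈ parts then "low"
    else if "info" ∈ parts then "info"
    else match parts with | [] => "unknown" | p :: _ => p
  else if s = "warn" ∨ s = "warning" then "medium"
  else if s = "crit" then "critical"
  else if pvSevOrder.contains s = false then s
  else s

-- ===== PORT B =====
def pvRank : PySem.Dict String Int :=
  PySem.Dict.ofList [("critical", 0), ("high", 1), ("warn", 2), ("warning", 2), ("medium", 2), ("low", 3), ("info", 4)]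

def pvCanon : List String := ["critical", "high", "medium", "low", "info"]

def normalise_sev_alt (raw : String) : String :=
  let s := PySem.Str.lower (PySem.Str.strip raw)
  if s = "" then "unknown"
  else if !(PySem.Str.isIn "/" s) then
    if s = "warn" ∨ s = "warning" then "medium"
    else if s = "crit" then "critical"
    else s
  else
    let parts := (((PySem.Str.split? s "/").getD []).map PySem.Str.strip).filter (fun q => q != "")
    let ranks := parts.filterMap (fun p => PySem.Dict.get? pvRank p)
    match PySem.List.min? ranks (fun x => x) with
    | some r => PySem.List.pyGetD pvCanon r "unknown"
    | none => match parts with | [] => "unknown" | p :: _ => p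

-- ===== PRECONDITION & SPEC =====
def Spec_normalise_sev (raw : String) (out : String) : Prop := out = normalise_sev_alt raw
instance (raw : String) (out : String) : Decidable (Spec_normalise_sev raw out) := by unfold Spec_normalise_sev; infer_instance

-- ===== CLAIM (what is proved, stated in full; the proofs are below) =====
def Claim_equal_normalise_sev : Prop := ∀ (raw : String), Dom_normalise_sev raw → Spec_normalise_sev raw (normalise_sev raw)

-- ===== LEMMAS AND PROOFS =====

-- a label that is none of pvRank's seven keys is not in pvRank
lemma rank_none (p : String) (h1 : p ≠ "critical") (h2 : p ≠ "high") (h3 : p ≠ "warn")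
    (h4 : p ≠ "warning") (h5 : p ≠ "medium") (h6 : p ≠ "low") (h7 : p ≠ "info") :
    PySem.Dict.get? pvRank p = none := by
  have hmk : pvRank = PySem.Dict.mk [("critical", 0), ("high", 1), ("warn", 2), ("warning", 2),
      ("medium", 2), ("low", 3), ("info", 4)] := by decide
  rw [hmk]
  simp only [PySem.Dict.get?_mk_cons, beq_iff_eq]
  rw [if_neg (fun e => h1 e.symm), if_neg (fun e => h2 e.symm), if_neg (fun e => h3 e.symm),
      if_neg (fun e => h4 e.symm), if_neg (fun e => h5 e.symm), if_neg (fun e => h6 e.symm),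
      if_neg (fun e => h7 e.symm)]
  rfl

-- every binding of pvRank, characterised
lemma rank_char (p : String) (m : Int) (h : PySem.Dict.get? pvRank p = some m) :
    (p = "critical" ∧ m = 0) ∨ (p = "high" ∧ m = 1) ∨
    ((p = "warn" ∨ p = "warning" ∨ p = "medium") ∧ m = 2) ∨
    (p = "low" ∧ m = 3) ∨ (p = "info" ∧ m = 4) := by
  by_cases h1 : p = "critical"
  · subst h1
    rw [show PySem.Dict.get? pvRank "critical" = some (0 : Int) from by decide,
        Option.some.injEq] at h
    exact Or.inl ⟨rfl, h.symm⟩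
  by_cases h2 : p = "high"
  · subst h2
    rw [show PySem.Dict.get? pvRank "high" = some (1 : Int) from by decide,
        Option.some.injEq] at h
    exact Or.inr (Or.inl ⟨rfl, h.symm⟩)
  by_cases h3 : p = "warn"
  · subst h3
    rw [show PySem.Dict.get? pvRank "warn" = some (2 : Int) from by decide,
        Option.some.injEq] at h
    exact Or.inr (Or.inr (Or.inl ⟨Or.inl rfl, h.symm⟩))
  by_cases h4 : p = "warning"
  · subst h4
    rw [show PySem.Dict.get? pvRank "warning" = some (2 : Int) from by decide,
        Option.some.injEq] at h
    exact Or.inr (Or.inr (Or.inl ⟨Or.inr (Or.inl rfl), h.symm⟩))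
  by_cases h5 : p = "medium"
  · subst h5
    rw [show PySem.Dict.get? pvRank "medium" = some (2 : Int) from by decide,
        Option.some.injEq] at h
    exact Or.inr (Or.inr (Or.inl ⟨Or.inr (Or.inr rfl), h.symm⟩))
  by_cases h6 : p = "low"
  · subst h6
    rw [show PySem.Dict.get? pvRank "low" = some (3 : Int) from by decide,
        Option.some.injEq] at h
    exact Or.inr (Or.inr (Or.inr (Or.inl ⟨rfl, h.symm⟩)))
  by_cases h7 : p = "info"
  · subst h7
    rw [show PySem.Dict.get? pvRank "info" = some (4 : Int) from by decide,
        Option.some.injEq] at h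
    exact Or.inr (Or.inr (Or.inr (Or.inr ⟨rfl, h.symm⟩)))
  · rw [rank_none p h1 h2 h3 h4 h5 h6 h7] at h
    simp at h

-- min(xs) for a witnessed lower bound that is attained
lemma min?_eq_some_of (xs : List Int) (m : Int) (h1 : m ∈ xs) (h2 : ∀ y ∈ xs, m ≤ y) :
    PySem.List.min? xs (fun x => x) = some m := by
  cases hm : PySem.List.min? xs (fun x => x) with
  | none =>
      rw [PySem.List.min?_eq_none_iff] at hm
      subst hm; simp at h1
  | some m' =>
      have hle := PySem.List.min?_isMin hm m h1
      have hmem := PySem.List.min?_mem hm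
      simp only at hle
      rw [le_antisymm hle (h2 m' hmem)]

-- A's priority cascade equals B's min-rank reduction, for any list of parts
lemma cascade (parts : List String) :
    (if "critical" ∈ parts then "critical"
     else if "high" ∈ parts then "high"
     else if "warn" ∈ parts ∨ "warning" ∈ parts ∨ "medium" ∈ parts then "medium"
     else if "low" ∈ parts then "low"
     else if "info" ∈ parts then "info"
     else match parts with | [] => "unknown" | p :: _ => p)
    = (match PySem.List.min? (parts.filterMap (fun p => PySem.Dict.get? pvRank p)) (fun x => x) with
       | some r => PySem.List.pyGetD pvCanon r "unknown"
       | none => match parts with | [] => "unknown" | p :: _ => p) := by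
  set ranks := parts.filterMap (fun p => PySem.Dict.get? pvRank p) with hranks
  have hmem : ∀ m : Int, m ∈ ranks ↔ ∃ p ∈ parts, PySem.Dict.get? pvRank p = some m := by
    intro m; rw [hranks, List.mem_filterMap]
  by_cases hc : "critical" ∈ parts
  · have hmin : PySem.List.min? ranks (fun x => x) = some 0 := by
      refine min?_eq_some_of _ _ ((hmem 0).mpr ⟨"critical", hc, by decide⟩) (fun y hy => ?_)
      obtain ⟨p, hp, hr⟩ := (hmem y).mp hy
      rcases rank_char p y hr with ⟨_, h⟩ | ⟨_, h⟩ | ⟨_, h⟩ | ⟨_, h⟩ | ⟨_, h⟩ <;> omega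
    simp only [hmin, if_pos hc]; decide
  by_cases hh : "high" ∈ parts
  · have hmin : PySem.List.min? ranks (fun x => x) = some 1 := by
      refine min?_eq_some_of _ _ ((hmem 1).mpr ⟨"high", hh, by decide⟩) (fun y hy => ?_)
      obtain ⟨p, hp, hr⟩ := (hmem y).mp hy
      rcases rank_char p y hr with ⟨hpe, h⟩ | ⟨_, h⟩ | ⟨_, h⟩ | ⟨_, h⟩ | ⟨_, h⟩
      · exact absurd (hpe ▸ hp) hc
      all_goals omega
    simp only [hmin, if_neg hc, if_pos hh]; decide
  by_cases hw : "warn" ∈ parts ∨ "warning" ∈ parts ∨ "medium" ∈ parts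
  · have h2 : (2 : Int) ∈ ranks := by
      rcases hw with h | h | h
      · exact (hmem 2).mpr ⟨"warn", h, by decide⟩
      · exact (hmem 2).mpr ⟨"warning", h, by decide⟩
      · exact (hmem 2).mpr ⟨"medium", h, by decide⟩
    have hmin : PySem.List.min? ranks (fun x => x) = some 2 := by
      refine min?_eq_some_of _ _ h2 (fun y hy => ?_)
      obtain ⟨p, hp, hr⟩ := (hmem y).mp hy
      rcases rank_char p y hr with ⟨hpe, h⟩ | ⟨hpe, h⟩ | ⟨_, h⟩ | ⟨_, h⟩ | ⟨_, h⟩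
      · exact absurd (hpe ▸ hp) hc
      · exact absurd (hpe ▸ hp) hh
      all_goals omega
    simp only [hmin, if_neg hc, if_neg hh, if_pos hw]; decide
  by_cases hl : "low" ∈ parts
  · have hmin : PySem.List.min? ranks (fun x => x) = some 3 := by
      refine min?_eq_some_of _ _ ((hmem 3).mpr ⟨"low", hl, by decide⟩) (fun y hy => ?_)
      obtain ⟨p, hp, hr⟩ := (hmem y).mp hy
      rcases rank_char p y hr with ⟨hpe, h⟩ | ⟨hpe, h⟩ | ⟨hpe, h⟩ | ⟨_, h⟩ | ⟨_, h⟩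
      · exact absurd (hpe ▸ hp) hc
      · exact absurd (hpe ▸ hp) hh
      · exfalso; apply hw
        rcases hpe with h' | h' | h'
        · exact Or.inl (h' ▸ hp)
        · exact Or.inr (Or.inl (h' ▸ hp))
        · exact Or.inr (Or.inr (h' ▸ hp))
      all_goals omega
    simp only [hmin, if_neg hc, if_neg hh, if_neg hw, if_pos hl]; decide
  by_cases hi : "info" ∈ parts
  · have hmin : PySem.List.min? ranks (fun x => x) = some 4 := by
      refine min?_eq_some_of _ _ ((hmem 4).mpr ⟨"info", hi, by decide⟩) (fun y hy => ?_)
      obtain ⟨p, hp, hr⟩ := (hmem y).mp hy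
      rcases rank_char p y hr with ⟨hpe, h⟩ | ⟨hpe, h⟩ | ⟨hpe, h⟩ | ⟨hpe, h⟩ | ⟨_, h⟩
      · exact absurd (hpe ▸ hp) hc
      · exact absurd (hpe ▸ hp) hh
      · exfalso; apply hw
        rcases hpe with h' | h' | h'
        · exact Or.inl (h' ▸ hp)
        · exact Or.inr (Or.inl (h' ▸ hp))
        · exact Or.inr (Or.inr (h' ▸ hp))
      · exact absurd (hpe ▸ hp) hl
      · omega
    simp only [hmin, if_neg hc, if_neg hh, if_neg hw, if_neg hl, if_pos hi]; decide
  · have hnil : ranks = [] := by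
      rw [hranks, List.filterMap_eq_nil_iff]
      intro p hp
      cases hr : PySem.Dict.get? pvRank p with
      | none => rfl
      | some m =>
          exfalso
          rcases rank_char p m hr with ⟨hpe, _⟩ | ⟨hpe, _⟩ | ⟨hpe, _⟩ | ⟨hpe, _⟩ | ⟨hpe, _⟩
          · exact hc (hpe ▸ hp)
          · exact hh (hpe ▸ hp)
          · apply hw
            rcases hpe with h' | h' | h'
            · exact Or.inl (h' ▸ hp)
            · exact Or.inr (Or.inl (h' ▸ hp))
            · exact Or.inr (Or.inr (h' ▸ hp))
          · exact hl (hpe ▸ hp)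
          · exact hi (hpe ▸ hp)
    have hmin : PySem.List.min? ranks (fun x => x) = none := by
      rw [PySem.List.min?_eq_none_iff]; exact hnil
    simp only [hmin, if_neg hc, if_neg hh, if_neg hw, if_neg hl, if_neg hi]

-- ===== VERDICT (by name: the statement is the Claim_ definition above) =====
set_option maxHeartbeats 1000000 in
theorem normalise_sev_spec : Claim_equal_normalise_sev := by
  intro raw _
  unfold Spec_normalise_sev normalise_sev normalise_sev_alt
  generalize PySem.Str.lower (PySem.Str.strip raw) = s
  by_cases h0 : s = ""
  · simp only [if_pos h0]
  by_cases hin : PySem.Str.isIn "/" s = true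
  · simp only [if_neg h0, hin, if_true, Bool.not_true, Bool.false_eq_true, if_false]
    simp only [List.filter_map, Function.comp_def]
    generalize List.map PySem.Str.strip
      (List.filter (fun p => PySem.Str.strip p != "") ((PySem.Str.split? s "/").getD [])) = parts
    exact cascade parts
  · simp only [if_neg h0, Bool.eq_false_iff.mpr hin, Bool.false_eq_true, if_false,
      Bool.not_false, if_true]
    split_ifs <;> rfl
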